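-- pv_equiv track=rewrite | github.com/elidub/Graphs4CausalFoundationModels | experiments/GraphConditioning/aggregate_results/lingaus_idk/generate_plots.py | extract_model_name
-- ===== SOURCE A (Python) =====
-- def extract_model_name(checkpoint_name):
--     """Extract model name from checkpoint directory name."""
--     parts = checkpoint_name.split('_')
--     model_name_parts = []
--     is_ancestor = False
--
--     if "ancestor" in parts:
--         is_ancestor = True
--
--     start_collecting = False
--     for i, part in enumerate(parts):
--         # Start collecting after "benchmarked" or "idk"
--         if part in ["benchmarked", "idk"]:
--             start_collecting = True
--             continue
--
--         if "node" in part and part.replace("node", "").isdigit():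
--             start_collecting = True
--             continue
--
--         if start_collecting and not part.replace('.', '').replace('-', '').isdigit():
--             model_name_parts.append(part)
--
--     model_name = '_'.join(model_name_parts) if model_name_parts else 'unknown'
--
--     # For IDK models, simplify the name (remove redundant "idk" suffix if present)
--     if is_ancestor and model_name != 'unknown':
--         model_name = f'idk_{model_name}'
--
--     return model_name
-- ===== SOURCE B (Python) =====
-- def extract_model_name(checkpoint_name):
--     """Extract model name from checkpoint directory name."""
--
--     def is_trigger(p):
--         return p in ("benchmarked", "idk") or ("node" in p and p.replace("node", "").isdigit())
--
--     def is_numeric(p):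
--         return p.replace('.', '').replace('-', '').isdigit()
--
--     def name_of(ps):
--         # joined name of the kept tokens of ps, built directly by recursion
--         # (None = no kept token at all)
--         if not ps:
--             return None
--         rest = name_of(ps[1:])
--         p = ps[0]
--         if is_trigger(p) or is_numeric(p):
--             return rest
--         return p if rest is None else p + '_' + rest
--
--     def after_first_trigger(ps):
--         if not ps:
--             return None
--         if is_trigger(ps[0]):
--             return name_of(ps[1:])
--         return after_first_trigger(ps[1:])
--
--     parts = checkpoint_name.split('_')
--     name = after_first_trigger(parts)
--     model_name = 'unknown' if name is None else name
--     if 'ancestor' in parts and model_name != 'unknown':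
--         model_name = 'idk_' + model_name
--     return model_name
-- ===== Notes on version B (the rewrite author's own statement) =====
-- stated objective: alternative
-- what changed: A's imperative loop with a start_collecting flag, a list accumulator and a final join is replaced by two recursive helpers that skip to the first trigger token and then build the joined name string directly during the recursion (Optional result, no intermediate list, no flag, no join).
import Mathlib
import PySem

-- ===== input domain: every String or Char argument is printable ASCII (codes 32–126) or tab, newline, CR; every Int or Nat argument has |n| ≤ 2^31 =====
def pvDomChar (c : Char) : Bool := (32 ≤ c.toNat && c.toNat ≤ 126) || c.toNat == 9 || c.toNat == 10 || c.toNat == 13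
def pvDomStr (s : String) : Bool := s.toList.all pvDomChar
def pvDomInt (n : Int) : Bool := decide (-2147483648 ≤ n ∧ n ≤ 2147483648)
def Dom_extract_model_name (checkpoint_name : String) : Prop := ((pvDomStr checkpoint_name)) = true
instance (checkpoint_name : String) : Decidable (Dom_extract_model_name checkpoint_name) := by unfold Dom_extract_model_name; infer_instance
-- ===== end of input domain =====

-- B replaces A's imperative flag loop + list accumulator + join by two recursive helpers
-- that build the joined name string directly (no list, no flag, no join): simpler decomposition.

-- ===== PORT A =====
-- literal transliteration of A: one fold carrying (start_collecting, model_name_parts)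
def extract_model_name (checkpoint_name : String) : String :=
  let parts := (PySem.Str.split? checkpoint_name "_").getD []
  let is_ancestor := parts.contains "ancestor"
  let res := parts.foldl (fun (st : Bool × List String) part =>
    if part == "benchmarked" || part == "idk" then (true, st.2)
    else if PySem.Str.isIn "node" part && PySem.Str.strIsdigit (PySem.Str.replace part "node" "") then
      (true, st.2)
    else if st.1 && !(PySem.Str.strIsdigit (PySem.Str.replace (PySem.Str.replace part "." "") "-" "")) then
      (st.1, st.2 ++ [part])
    else st) (false, ([] : List String))
  let model_name := if res.2 ≠ [] then PySem.Str.join "_" res.2 else "unknown"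
  if is_ancestor && model_name != "unknown" then "idk_" ++ model_name else model_name

-- ===== PORT B =====
def pvTrigger (p : String) : Bool :=
  p == "benchmarked" || p == "idk" ||
  (PySem.Str.isIn "node" p && PySem.Str.strIsdigit (PySem.Str.replace p "node" ""))

def pvNumeric (p : String) : Bool :=
  PySem.Str.strIsdigit (PySem.Str.replace (PySem.Str.replace p "." "") "-" "")

-- Source B's name_of: joined name of the kept tokens, built directly by recursion (none = no kept token)
def pvNameOf : List String → Option String
  | [] => none
  | p :: l =>
    let rest := pvNameOf l
    if pvTrigger p || pvNumeric p then rest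
    else match rest with
      | none => some p
      | some r => some (p ++ "_" ++ r)

-- Source B's after_first_trigger
def pvAfter : List String → Option String
  | [] => none
  | p :: l => if pvTrigger p then pvNameOf l else pvAfter l

def extract_model_name_alt (checkpoint_name : String) : String :=
  let parts := (PySem.Str.split? checkpoint_name "_").getD []
  let model_name := match pvAfter parts with
    | none => "unknown"
    | some n => n
  if parts.contains "ancestor" && model_name != "unknown" then "idk_" ++ model_name else model_name

-- ===== PRECONDITION & SPEC =====
def Spec_extract_model_name (checkpoint_name : String) (out : String) : Prop := out = extract_model_name_alt checkpoint_name
instance (checkpoint_name : String) (out : String) : Decidable (Spec_extract_model_name checkpoint_name out) := by unfold Spec_extract_model_name; infer_instance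

-- ===== CLAIM (what is proved, stated in full; the proofs are below) =====
def Claim_equal_extract_model_name : Prop := ∀ (checkpoint_name : String), Dom_extract_model_name checkpoint_name → Spec_extract_model_name checkpoint_name (extract_model_name checkpoint_name)

-- ===== LEMMAS AND PROOFS =====

-- A's loop body, named for the proofs
def pvStep (st : Bool × List String) (part : String) : Bool × List String :=
  if part == "benchmarked" || part == "idk" then (true, st.2)
  else if PySem.Str.isIn "node" part && PySem.Str.strIsdigit (PySem.Str.replace part "node" "") then
    (true, st.2)
  else if st.1 && !(PySem.Str.strIsdigit (PySem.Str.replace (PySem.Str.replace part "." "") "-" "")) then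
    (st.1, st.2 ++ [part])
  else st

lemma pvStep_true (acc : List String) (p : String) :
    pvStep (true, acc) p =
      (true, if !pvTrigger p && !pvNumeric p then acc ++ [p] else acc) := by
  simp only [pvStep, pvTrigger, pvNumeric]
  rcases Bool.eq_false_or_eq_true (p == "benchmarked" || p == "idk") with h1 | h1 <;>
    rcases Bool.eq_false_or_eq_true
      (PySem.Str.isIn "node" p && PySem.Str.strIsdigit (PySem.Str.replace p "node" "")) with h2 | h2 <;>
      rcases Bool.eq_false_or_eq_true
        (PySem.Str.strIsdigit (PySem.Str.replace (PySem.Str.replace p "." "") "-" "")) with h3 | h3 <;>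
        (simp only [h1, h2, h3]; simp)

lemma pvStep_false (acc : List String) (p : String) :
    pvStep (false, acc) p = (pvTrigger p, acc) := by
  simp only [pvStep, pvTrigger]
  rcases Bool.eq_false_or_eq_true (p == "benchmarked" || p == "idk") with h1 | h1 <;>
    rcases Bool.eq_false_or_eq_true
      (PySem.Str.isIn "node" p && PySem.Str.strIsdigit (PySem.Str.replace p "node" "")) with h2 | h2 <;>
      (simp only [h1, h2]; simp)

lemma pvLoop_true (l : List String) (acc : List String) :
    l.foldl pvStep (true, acc) =
      (true, acc ++ l.filter (fun p => !pvTrigger p && !pvNumeric p)) := by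
  induction l generalizing acc with
  | nil => simp
  | cons p l ih =>
    simp only [List.foldl_cons, pvStep_true, List.filter_cons]
    by_cases h : (!pvTrigger p && !pvNumeric p) = true <;> simp [h, ih]

-- characterization of B's string-building recursion by the kept-token list
lemma pvJoin_cons (p : String) (k : String) (ks : List String) :
    PySem.Str.join "_" (p :: k :: ks) = p ++ "_" ++ PySem.Str.join "_" (k :: ks) := by
  apply String.toList_inj.mp
  simp [PySem.Str.join, PySem.Chars.join_cons_cons]

lemma pvJoin_singleton (p : String) : PySem.Str.join "_" [p] = p := by
  apply String.toList_inj.mp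
  simp [PySem.Str.join, PySem.Chars.join_singleton]

lemma pvNameOf_eq (l : List String) :
    pvNameOf l =
      match l.filter (fun p => !pvTrigger p && !pvNumeric p) with
      | [] => none
      | ks => some (PySem.Str.join "_" ks) := by
  induction l with
  | nil => rfl
  | cons p l ih =>
    simp only [pvNameOf, List.filter_cons]
    by_cases ht : pvTrigger p = true
    · simp [ht, ih]
    · by_cases hn : pvNumeric p = true
      · simp [ht, hn, ih]
      · simp only [ht, hn, Bool.or_false, Bool.false_eq_true, if_false, Bool.not_false,
          Bool.and_self, if_true, ih]
        cases hf : l.filter (fun p => !pvTrigger p && !pvNumeric p) with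
        | nil => simp [pvJoin_singleton]
        | cons k ks => simp [pvJoin_cons]

lemma pvLoop_false (l : List String) (acc : List String) :
    l.foldl pvStep (false, acc) =
      match l.findIdx? pvTrigger with
      | none => (false, acc)
      | some i => (true, acc ++ (l.drop (i + 1)).filter (fun p => !pvTrigger p && !pvNumeric p)) := by
  induction l generalizing acc with
  | nil => simp
  | cons p l ih =>
    simp only [List.foldl_cons, pvStep_false, List.findIdx?_cons]
    by_cases h : pvTrigger p = true
    · simp [h, pvLoop_true]
    · simp only [h, Bool.false_eq_true, if_false, ih]
      cases hf : l.findIdx? pvTrigger <;> simp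

lemma pvAfter_eq (l : List String) :
    pvAfter l =
      match l.findIdx? pvTrigger with
      | none => none
      | some i => pvNameOf (l.drop (i + 1)) := by
  induction l with
  | nil => rfl
  | cons p l ih =>
    simp only [pvAfter, List.findIdx?_cons]
    by_cases h : pvTrigger p = true
    · simp [h]
    · simp only [h, Bool.false_eq_true, if_false, ih]
      cases hf : l.findIdx? pvTrigger <;> simp

lemma pvMain (s : String) : extract_model_name s = extract_model_name_alt s := by
  unfold extract_model_name extract_model_name_alt
  have h := pvLoop_false ((PySem.Str.split? s "_").getD []) []
  simp only [show (fun (st : Bool × List String) part =>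
      if part == "benchmarked" || part == "idk" then (true, st.2)
      else if PySem.Str.isIn "node" part && PySem.Str.strIsdigit (PySem.Str.replace part "node" "") then
        (true, st.2)
      else if st.1 && !(PySem.Str.strIsdigit (PySem.Str.replace (PySem.Str.replace part "." "") "-" "")) then
        (st.1, st.2 ++ [part])
      else st) = pvStep from rfl]
  rw [h, pvAfter_eq]
  cases hf : ((PySem.Str.split? s "_").getD []).findIdx? pvTrigger with
  | none => simp
  | some i =>
    simp only [pvNameOf_eq]
    cases hk : (((PySem.Str.split? s "_").getD []).drop (i + 1)).filter
        (fun p => !pvTrigger p && !pvNumeric p) <;> simp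

-- ===== VERDICT (by name: the statement is the Claim_ definition above) =====
theorem extract_model_name_spec : Claim_equal_extract_model_name := by
  intro s _
  unfold Spec_extract_model_name
  exact pvMain s
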